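-- pv_equiv track=rewrite | github.com/Swingyboy/goit-qc-hw-02 | permutation_encryption.py | create_permutation
-- ===== SOURCE A (Python) =====
-- def create_permutation(key):
--     sorted_key = sorted(list(key))
--
--     # Create a mapping from character to its position in the sorted key
--     position_map = {}
--     for i, char in enumerate(sorted_key):
--         if char not in position_map:
--             position_map[char] = []
--         position_map[char].append(i + 1)
--
--     # Generate the numerical sequence based on the original key
--     numerical_sequence = []
--     for char in key:
--         numerical_sequence.append(position_map[char].pop(0))
--
--     return numerical_sequence
-- ===== SOURCE B (Python) =====
-- def create_permutation(key):
--     # Counting approach: rank of each character = (# chars smaller than it)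
--     # + (# equal chars seen earlier) + 1; only the distinct characters are sorted.
--     counts = {}
--     for c in key:
--         counts[c] = counts.get(c, 0) + 1
--     start = {}
--     acc = 0
--     for c in sorted(counts):
--         start[c] = acc
--         acc += counts[c]
--     seen = {}
--     result = []
--     for c in key:
--         s = seen.get(c, 0)
--         result.append(start[c] + s + 1)
--         seen[c] = s + 1
--     return result
-- ===== Notes on version B (the rewrite author's own statement) =====
-- stated objective: faster
-- what changed: Replaces A's full sort plus per-character bucket lists consumed with pop(0) by a counting scheme: tally each character, prefix-sum over the sorted distinct characters to get each character's starting rank, then emit start+seen+1 in one linear pass.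
import Mathlib
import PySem

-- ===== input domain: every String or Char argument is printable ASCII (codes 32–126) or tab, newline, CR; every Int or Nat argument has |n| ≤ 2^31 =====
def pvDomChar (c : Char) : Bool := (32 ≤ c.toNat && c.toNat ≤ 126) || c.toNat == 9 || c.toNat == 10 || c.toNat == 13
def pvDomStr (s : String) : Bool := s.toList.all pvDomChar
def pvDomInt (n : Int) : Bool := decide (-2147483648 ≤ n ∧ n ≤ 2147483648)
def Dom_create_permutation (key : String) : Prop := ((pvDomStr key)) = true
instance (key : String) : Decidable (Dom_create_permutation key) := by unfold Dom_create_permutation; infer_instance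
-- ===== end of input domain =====

-- B replaces A's full sort + per-character bucket lists (with quadratic pop(0)) by a
-- counting scheme: count each character, sort only the distinct characters to get each
-- character's starting rank, then emit start + seen + 1 in one linear pass.

-- ===== PORT A =====
def create_permutation (key : String) : List Int :=
  let sorted_key := PySem.List.sorted key.toList (fun c => c)
  let position_map := (PySem.List.enumerate sorted_key).foldl
    (fun (d : PySem.Dict Char (List Int)) p =>
      let d1 := if d.contains p.2 then d else d.insert p.2 ([] : List Int)
      d1.modify p.2 [] (fun l => l ++ [p.1 + 1]))
    PySem.Dict.empty
  let res := key.toList.foldl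
    (fun (st : List Int × PySem.Dict Char (List Int)) c =>
      match st.2.getD c [] with
      | [] => st          -- unreachable: every character of key has a non-empty bucket
      | x :: rest => (st.1 ++ [x], st.2.insert c rest))
    ([], position_map)
  res.1

-- ===== PORT B =====
def create_permutation_alt (key : String) : List Int :=
  let l := key.toList
  let counts := l.foldl
    (fun (d : PySem.Dict Char Int) c => d.insert c (d.getD c 0 + 1)) PySem.Dict.empty
  let startAcc := (PySem.List.sorted counts.keys (fun c => c)).foldl
    (fun (p : PySem.Dict Char Int × Int) c => (p.1.insert c p.2, p.2 + counts.getD c 0))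
    (PySem.Dict.empty, 0)
  let start := startAcc.1
  let res := l.foldl
    (fun (p : List Int × PySem.Dict Char Int) c =>
      let s := p.2.getD c 0
      (p.1 ++ [start.getD c 0 + s + 1], p.2.insert c (s + 1)))   -- start[c]: c is always a key of start
    ([], PySem.Dict.empty)
  res.1

-- ===== PRECONDITION & SPEC =====
def Spec_create_permutation (key : String) (out : List Int) : Prop := out = create_permutation_alt key
instance (key : String) (out : List Int) : Decidable (Spec_create_permutation key out) := by unfold Spec_create_permutation; infer_instance

-- ===== CLAIM (what is proved, stated in full; the proofs are below) =====
def Claim_equal_create_permutation : Prop := ∀ (key : String), Dom_create_permutation key → Spec_create_permutation key (create_permutation key)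

-- ===== LEMMAS AND PROOFS =====

-- number of characters of l strictly below c
def pvCntLt (l : List Char) (c : Char) : Int := (l.countP (fun d => decide (d < c)) : Int)

-- the 1-based positions of c inside the sorted version of l
def pvPos (l : List Char) (c : Char) : List Int :=
  (List.range (l.count c)).map (fun (j : Nat) => pvCntLt l c + (j : Int) + 1)

-- the common characterisation of both programs' output, starting at offset k
def pvRanks (l : List Char) (k : Nat) : List Char → List Int
  | [] => []
  | c :: cs => (pvCntLt l c + ((l.take k).count c : Int) + 1) :: pvRanks l (k + 1) cs


-- A's bucket-building step: the explicit "if absent, insert []" before the append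
-- is one dict modify with default []
lemma pvStepA_eq (d : PySem.Dict Char (List Int)) (k : Char) (x : Int) :
    ((if d.contains k then d else d.insert k ([] : List Int)).modify k [] (fun l => l ++ [x]))
    = d.modify k [] (fun l => l ++ [x]) := by
  by_cases h : d.contains k = true
  · simp [h]
  · have h' : d.contains k = false := eq_false_of_ne_true h
    simp only [h', Bool.false_eq_true, if_false, PySem.Dict.modify]
    have hget : d.get? k = none := by
      simp only [PySem.Dict.get?, Option.map_eq_none_iff]
      simp only [PySem.Dict.contains, List.any_eq_false] at h'
      exact List.find?_eq_none.mpr h'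
    have h2 : (d.insert k ([] : List Int)).getD k [] = [] := by
      simp [PySem.Dict.getD, PySem.Dict.get?_insert_self]
    rw [h2, PySem.Dict.insert_insert_self]
    simp [PySem.Dict.getD, hget]

-- contents of A's position_map: per character, the 1-based indices of its occurrences in s
lemma pvDictA_getD (s : List Char) (c : Char) :
    ((PySem.List.enumerate s).foldl
      (fun (d : PySem.Dict Char (List Int)) p =>
        let d1 := if d.contains p.2 then d else d.insert p.2 ([] : List Int)
        d1.modify p.2 [] (fun l => l ++ [p.1 + 1])) PySem.Dict.empty).getD c []
    = ((PySem.List.enumerate s).filter (fun p => p.2 == c)).map (fun p => p.1 + 1) := by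
  have hfun : (fun (d : PySem.Dict Char (List Int)) (p : Int × Char) =>
      let d1 := if d.contains p.2 then d else d.insert p.2 ([] : List Int)
      d1.modify p.2 [] (fun l => l ++ [p.1 + 1]))
      = fun (d : PySem.Dict Char (List Int)) (p : Int × Char) =>
          d.modify p.2 [] (fun l => l ++ [p.1 + 1]) := by
    funext d p
    exact pvStepA_eq d p.2 (p.1 + 1)
  rw [hfun]
  have hmap : (PySem.List.enumerate s).foldl
      (fun (d : PySem.Dict Char (List Int)) (p : Int × Char) => d.modify p.2 [] (fun l => l ++ [p.1 + 1]))
      PySem.Dict.empty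
      = (((PySem.List.enumerate s).map (fun p => (p.2, p.1 + 1))).foldl
          (fun (d : PySem.Dict Char (List Int)) (q : Char × Int) => d.modify q.1 [] (fun l => l ++ [q.2]))
          PySem.Dict.empty) := by
    rw [List.foldl_map]
  rw [hmap, PySem.Dict.getD_foldl_modify_append]
  simp [List.filter_map, List.map_map, Function.comp_def, PySem.Dict.getD, PySem.Dict.get?, PySem.Dict.empty]

-- in a sorted list, the indices of c form the contiguous block after the smaller characters
lemma pvEnumFilterSorted (c : Char) : ∀ (s : List Char), List.Pairwise (· ≤ ·) s → ∀ k : Int,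
    ((PySem.List.enumerate s k).filter (fun p => p.2 == c)).map (fun p => p.1 + 1)
    = (List.range (s.count c)).map (fun (j : Nat) => k + (s.countP (fun d => decide (d < c)) : Int) + (j : Int) + 1) := by
  intro s
  induction s with
  | nil => intro _ k; simp [PySem.List.enumerate]
  | cons a t ih =>
    intro hp k
    obtain ⟨ha, ht⟩ := List.pairwise_cons.mp hp
    rw [PySem.List.enumerate_cons, List.filter_cons]
    rcases lt_trichotomy a c with hlt | heq | hgt
    · have hne : (a == c) = false := by simp [ne_of_lt hlt]
      simp only [hne, Bool.false_eq_true, if_false]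
      rw [ih ht (k + 1), List.count_cons, List.countP_cons]
      simp only [hne, hlt, decide_true, if_true]
      refine List.map_congr_left (fun j _ => ?_)
      push_cast
      ring
    · subst heq
      have h0 : t.countP (fun d => decide (d < a)) = 0 := by
        rw [List.countP_eq_zero]
        intro b hb
        simpa using not_lt.mpr (ha b hb)
      simp only [BEq.rfl, if_true]
      rw [List.map_cons, ih ht (k + 1), List.count_cons_self, List.range_succ_eq_map,
        List.map_cons, List.countP_cons]
      simp only [h0, lt_self_iff_false, decide_false]
      refine congrArg₂ _ (by push_cast; ring) ?_
      rw [List.map_map]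
      refine List.map_congr_left (fun j _ => ?_)
      simp only [Function.comp_apply]
      push_cast
      ring
    · have hne : (a == c) = false := by simp [(ne_of_lt hgt).symm]
      have hcnt : t.count c = 0 := by
        rw [List.count_eq_zero]
        intro hc
        exact absurd (lt_of_lt_of_le hgt (ha c hc)) (lt_irrefl c)
      simp only [hne, Bool.false_eq_true, if_false]
      rw [ih ht (k + 1), List.count_cons, hcnt]
      simp [hne]

lemma pvDictA_eq_pvPos (l : List Char) (c : Char) :
    ((PySem.List.enumerate (PySem.List.sorted l (fun c => c))).foldl
      (fun (d : PySem.Dict Char (List Int)) p =>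
        let d1 := if d.contains p.2 then d else d.insert p.2 ([] : List Int)
        d1.modify p.2 [] (fun l => l ++ [p.1 + 1])) PySem.Dict.empty).getD c []
    = pvPos l c := by
  have hperm : (PySem.List.sorted l (fun c => c)).Perm l := PySem.List.sorted_perm l (fun c => c) false
  have hp : List.Pairwise (· ≤ ·) (PySem.List.sorted l (fun c => c)) :=
    PySem.List.sorted_pairwise l (fun c => c)
  rw [pvDictA_getD, pvEnumFilterSorted c _ hp 0, hperm.count_eq, hperm.countP_eq]
  unfold pvPos pvCntLt
  refine List.map_congr_left (fun j _ => ?_)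
  ring

-- A's emission loop
lemma pvLoopA (l : List Char) : ∀ (rest p : List Char), l = p ++ rest →
    ∀ (acc : List Int) (d : PySem.Dict Char (List Int)),
    (∀ c, d.getD c [] = (pvPos l c).drop (p.count c)) →
    (rest.foldl
      (fun (st : List Int × PySem.Dict Char (List Int)) c =>
        match st.2.getD c [] with
        | [] => st
        | x :: r => (st.1 ++ [x], st.2.insert c r)) (acc, d)).1
    = acc ++ pvRanks l p.length rest := by
  intro rest
  induction rest with
  | nil => intro p _ acc d _; simp [pvRanks]
  | cons c rest' ih =>
    intro p hl acc d hinv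
    have hk : p.count c < l.count c := by
      have : l.count c = p.count c + (c :: rest').count c := by
        rw [hl, List.count_append]
      rw [List.count_cons_self] at this
      omega
    have hlen : (pvPos l c).length = l.count c := by simp [pvPos]
    have hkl : p.count c < (pvPos l c).length := by omega
    have hdrop : (pvPos l c).drop (p.count c)
        = (pvPos l c)[p.count c] :: (pvPos l c).drop (p.count c + 1) :=
      List.drop_eq_getElem_cons hkl
    have hel : (pvPos l c)[p.count c]'hkl = pvCntLt l c + (p.count c : Int) + 1 := by
      simp [pvPos]
    have htake : l.take p.length = p := by rw [hl]; exact List.take_left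
    rw [List.foldl_cons]
    have hd : d.getD c [] = (pvPos l c)[p.count c] :: (pvPos l c).drop (p.count c + 1) := by
      rw [hinv c, hdrop]
    rw [pvRanks]
    simp only [hd]
    rw [ih (p ++ [c]) (by simp [hl]) (acc ++ [(pvPos l c)[p.count c]])
      (d.insert c ((pvPos l c).drop (p.count c + 1))) ?_]
    · rw [hel, htake]
      simp
    · intro c'
      rw [PySem.Dict.getD_insert]
      by_cases hcc : c' = c
      · subst hcc
        simp [List.count_append]
      · have h0 : List.count c' [c] = 0 := by
          simp only [List.count_singleton, beq_iff_eq]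
          exact if_neg (fun h => hcc h.symm)
        simp [hcc, List.count_append, h0, hinv c']

-- B: a fold over distinct keys never touched again preserves a lookup
lemma pvStartFold_notmem (cnt : Char → Int) : ∀ (cs : List Char) (d : PySem.Dict Char Int) (a : Int) (c : Char),
    c ∉ cs →
    ((cs.foldl (fun (p : PySem.Dict Char Int × Int) c => (p.1.insert c p.2, p.2 + cnt c)) (d, a)).1).getD c 0
    = d.getD c 0 := by
  intro cs
  induction cs with
  | nil => intro d a c _; simp
  | cons c0 cs' ih =>
    intro d a c hc
    rw [List.foldl_cons]
    have hne : c ≠ c0 := by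
      rintro rfl
      exact hc List.mem_cons_self
    rw [ih _ _ c (fun h => hc (List.mem_cons_of_mem _ h))]
    rw [PySem.Dict.getD_insert]
    simp [hne]

-- B: the prefix-sum fold assigns each key the sum of the counts of the keys before it
lemma pvStartFold_mem (cnt : Char → Int) : ∀ (cs : List Char), List.Pairwise (· < ·) cs →
    ∀ (d : PySem.Dict Char Int) (a : Int) (c : Char), c ∈ cs →
    ((cs.foldl (fun (p : PySem.Dict Char Int × Int) c => (p.1.insert c p.2, p.2 + cnt c)) (d, a)).1).getD c 0
    = a + ((cs.filter (fun d => decide (d < c))).map cnt).sum := by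
  intro cs
  induction cs with
  | nil => intro _ d a c hc; exact absurd hc (List.not_mem_nil)
  | cons c0 cs' ih =>
    intro hp d a c hc
    obtain ⟨hlt, hp'⟩ := List.pairwise_cons.mp hp
    rw [List.foldl_cons, List.filter_cons]
    rcases List.mem_cons.mp hc with rfl | hc'
    · have hnm : c ∉ cs' := fun h => absurd (hlt c h) (lt_irrefl c)
      rw [pvStartFold_notmem cnt cs' _ _ c hnm, PySem.Dict.getD_insert]
      have hflt : cs'.filter (fun d => decide (d < c)) = [] := by
        rw [List.filter_eq_nil_iff]
        intro b hb
        simpa using not_lt.mpr (le_of_lt (hlt b hb))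
      simp [hflt]
    · rw [ih hp' _ _ c hc']
      have : (decide (c0 < c)) = true := by simpa using hlt c hc'
      simp only [this, if_true, List.map_cons, List.sum_cons]
      ring

-- counting membership in c0 :: cs' splits when c0 is fresh
lemma pvCountPSplit (c0 : Char) (cs' : List Char) (hnm : c0 ∉ cs') :
    ∀ l : List Char, l.countP (fun x => decide (x ∈ c0 :: cs'))
      = l.count c0 + l.countP (fun x => decide (x ∈ cs')) := by
  intro l
  induction l with
  | nil => simp
  | cons y l' ihl =>
    rw [List.countP_cons, List.countP_cons, List.count_cons, ihl]
    by_cases hy : y = c0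
    · subst hy
      simp [hnm]
      omega
    · by_cases hy' : y ∈ cs' <;> simp [hy, hy'] <;> omega


-- summing the multiplicities of distinct values counts the members
lemma pvSumCounts (l : List Char) : ∀ (cs : List Char), cs.Nodup →
    ((cs.map (fun d => (l.count d : Int))).sum) = (l.countP (fun x => decide (x ∈ cs)) : Int) := by
  intro cs
  induction cs with
  | nil => intro _; simp
  | cons c0 cs' ih =>
    intro hnd
    obtain ⟨hnm, hnd'⟩ := List.nodup_cons.mp hnd
    rw [List.map_cons, List.sum_cons, ih hnd']
    rw [pvCountPSplit c0 cs' hnm l]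
    push_cast
    ring

-- B's start dict sends every character of l to the number of smaller characters of l
lemma pvStartB (l : List Char) (c : Char) (hc : c ∈ l) :
    (((PySem.List.sorted (PySem.Set.ofList l : List Char) (fun c => c)).foldl
      (fun (p : PySem.Dict Char Int × Int) c => (p.1.insert c p.2, p.2 + (l.count c : Int)))
      (PySem.Dict.empty, 0)).1).getD c 0 = pvCntLt l c := by
  have hperm : (PySem.List.sorted (PySem.Set.ofList l : List Char) (fun c => c)).Perm
      (PySem.Set.ofList l : List Char) :=
    PySem.List.sorted_perm _ (fun c => c) false
  have hnd : (PySem.List.sorted (PySem.Set.ofList l : List Char) (fun c => c)).Nodup :=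
    hperm.nodup_iff.mpr (PySem.Set.nodup_ofList l)
  have hple : List.Pairwise (· ≤ ·) (PySem.List.sorted (PySem.Set.ofList l : List Char) (fun c => c)) :=
    PySem.List.sorted_pairwise _ (fun c => c)
  have hplt : List.Pairwise (· < ·) (PySem.List.sorted (PySem.Set.ofList l : List Char) (fun c => c)) :=
    (hple.and hnd).imp (fun h => lt_of_le_of_ne h.1 h.2)
  have hmem : ∀ x : Char, x ∈ PySem.List.sorted (PySem.Set.ofList l : List Char) (fun c => c) ↔ x ∈ l := by
    intro x
    rw [hperm.mem_iff]
    exact PySem.Set.mem_ofList l x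
  rw [pvStartFold_mem _ _ hplt _ _ c ((hmem c).mpr hc)]
  rw [pvSumCounts l _ (List.Nodup.filter _ hnd)]
  have hcong : l.countP (fun x => decide (x ∈ (PySem.List.sorted (PySem.Set.ofList l : List Char)
      (fun c => c)).filter (fun d => decide (d < c)))) = l.countP (fun x => decide (x < c)) := by
    refine List.countP_congr (fun x hx => ?_)
    simp [List.mem_filter, hmem x, hx]
  rw [hcong]
  unfold pvCntLt
  ring

-- B's emission loop
lemma pvLoopB (l : List Char) (start : PySem.Dict Char Int)
    (hstart : ∀ c ∈ l, start.getD c 0 = pvCntLt l c) :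
    ∀ (rest p : List Char), l = p ++ rest →
    ∀ (acc : List Int) (seen : PySem.Dict Char Int),
    (∀ c, seen.getD c 0 = (p.count c : Int)) →
    (rest.foldl
      (fun (p : List Int × PySem.Dict Char Int) c =>
        let s := p.2.getD c 0
        (p.1 ++ [start.getD c 0 + s + 1], p.2.insert c (s + 1))) (acc, seen)).1
    = acc ++ pvRanks l p.length rest := by
  intro rest
  induction rest with
  | nil => intro p _ acc seen _; simp [pvRanks]
  | cons c rest' ih =>
    intro p hl acc seen hinv
    have hcl : c ∈ l := by rw [hl]; exact List.mem_append_right p List.mem_cons_self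
    have htake : l.take p.length = p := by rw [hl]; exact List.take_left
    rw [List.foldl_cons, pvRanks]
    simp only [hinv c, hstart c hcl]
    rw [ih (p ++ [c]) (by simp [hl]) _ _ ?_]
    · rw [htake]
      simp
    · intro c'
      rw [PySem.Dict.getD_insert]
      by_cases hcc : c' = c
      · subst hcc
        simp [List.count_append]
      · have h0 : List.count c' [c] = 0 := by
          simp only [List.count_singleton, beq_iff_eq]
          exact if_neg (fun h => hcc h.symm)
        simp [hcc, List.count_append, h0, hinv c']

lemma pvA_eq (key : String) : create_permutation key = pvRanks key.toList 0 key.toList := by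
  unfold create_permutation
  rw [pvLoopA key.toList key.toList [] rfl []]
  · simp
  · intro c
    rw [pvDictA_eq_pvPos]
    simp

lemma pvB_eq (key : String) : create_permutation_alt key = pvRanks key.toList 0 key.toList := by
  unfold create_permutation_alt
  simp only [PySem.Dict.foldl_insert_getD_add_one_eq_counter, PySem.Dict.keys_counter,
    PySem.Dict.getD_counter]
  rw [pvLoopB key.toList _ (fun c hc => pvStartB key.toList c hc) key.toList [] rfl []]
  · simp
  · intro c
    simp [PySem.Dict.getD, PySem.Dict.get?, PySem.Dict.empty]

-- ===== VERDICT (by name: the statement is the Claim_ definition above) =====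
theorem create_permutation_spec : Claim_equal_create_permutation := by
  intro key _
  unfold Spec_create_permutation
  rw [pvA_eq, pvB_eq]
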